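-- pv_equiv track=rewrite | github.com/arkdchst/kiber | sem_3/gait.py | check_lines
-- ===== SOURCE A (Python) =====
-- def check_lines(lines):
-- 	if len(lines) == 0 or len(lines[0]) == 0: return False
--
-- 	for line in lines:
-- 		if len(line) != len(lines[0]): return False
-- 		set_ = set(line)
-- 		if len(set_) > 2: return False
-- 		if not set_.issubset({'0','1'}): return False
-- 	return True
-- ===== SOURCE B (Python) =====
-- def check_lines(lines):
--     cols = list(zip(*lines))
--     if not cols:
--         return False
--     if sum(map(len, lines)) != len(lines) * len(cols):
--         return False
--     return all(c in '01' for col in cols for c in col)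
-- ===== Notes on version B (the rewrite author's own statement) =====
-- stated objective: alternative
-- what changed: Replaces A's row-by-row early-return loop (reference-length comparison plus a per-line set build and subset test) by a transpose: B builds cols = zip(*lines), decides the equal-nonzero-length condition arithmetically from sum of row lengths versus len(lines)*len(cols), and scans characters column-wise instead of line-wise.
import Mathlib
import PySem

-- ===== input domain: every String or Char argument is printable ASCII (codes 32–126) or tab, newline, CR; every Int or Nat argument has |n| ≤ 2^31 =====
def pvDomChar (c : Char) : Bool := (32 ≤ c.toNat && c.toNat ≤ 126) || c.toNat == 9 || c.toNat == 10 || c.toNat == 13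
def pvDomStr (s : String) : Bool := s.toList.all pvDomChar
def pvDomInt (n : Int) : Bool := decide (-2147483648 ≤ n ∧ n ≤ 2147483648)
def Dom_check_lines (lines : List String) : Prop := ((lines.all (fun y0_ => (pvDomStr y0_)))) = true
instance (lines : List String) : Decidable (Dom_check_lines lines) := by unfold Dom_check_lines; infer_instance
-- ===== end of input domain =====

-- B replaces A's per-line early-return loop (reference length + per-line set build and subset test)
-- by a transpose: cols = zip(*lines), one total-length arithmetic check, and a column-wise character
-- scan (objective: alternative).

-- ===== PORT A =====
-- the 'for line in lines' loop of A, with its early returns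
def checkLoopA (ref : Int) : List String → Bool
  | [] => true
  | line :: rest =>
    if PySem.Str.len line ≠ ref then false
    else
      let set_ : PySem.Set Char := PySem.Set.ofList line.toList
      if PySem.Set.len set_ > 2 then false
      else if !(PySem.Set.issubset set_ ['0', '1']) then false
      else checkLoopA ref rest

def check_lines (lines : List String) : Bool :=
  match lines with
  | [] => false
  | l0 :: rest =>
    if PySem.Str.len l0 = 0 then false
    else checkLoopA (PySem.Str.len l0) (l0 :: rest)

-- ===== PORT B =====
-- Python's zip(*rows): take heads while every row is nonempty (truncates to the shortest row).
-- 'fuel' is only a structural-termination device; the first row's length is always enough fuel.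
def pyZipStarFuel : Nat → List (List Char) → List (List Char)
  | 0, _ => []
  | fuel + 1, ls =>
    if ls = [] ∨ ls.any List.isEmpty then []
    else (ls.map (fun l => l.headD ' ')) :: pyZipStarFuel fuel (ls.map List.tail)

def pyZipStar (ls : List (List Char)) : List (List Char) :=
  pyZipStarFuel ((ls.headD []).length) ls

-- cols = list(zip(*lines)); emptiness check; total-length arithmetic; column-wise '0'/'1' scan
def check_lines_alt (lines : List String) : Bool :=
  let cols := pyZipStar (lines.map String.toList)
  if cols.isEmpty then false
  else if (lines.map PySem.Str.len).sum ≠ (lines.length : Int) * (cols.length : Int) then false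
  else cols.all (fun col => col.all (fun c => (['0', '1'] : List Char).contains c))  -- c in '01'

-- ===== PRECONDITION & SPEC =====
def Spec_check_lines (lines : List String) (out : Bool) : Prop := out = check_lines_alt lines
instance (lines : List String) (out : Bool) : Decidable (Spec_check_lines lines out) := by unfold Spec_check_lines; infer_instance

-- ===== CLAIM (what is proved, stated in full; the proofs are below) =====
def Claim_equal_check_lines : Prop := ∀ (lines : List String), Dom_check_lines lines → Spec_check_lines lines (check_lines lines)

-- ===== LEMMAS AND PROOFS =====

-- a nodup list included in a list has no greater length
theorem nodup_subset_length_le {α : Type} [DecidableEq α] (l l' : List α)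
    (h : l.Nodup) (h2 : l ⊆ l') : l.length ≤ l'.length := by
  calc l.length = l.toFinset.card := (List.toFinset_card_of_nodup h).symm
    _ ≤ l'.toFinset.card := Finset.card_le_card (fun x hx => by
        simp only [List.mem_toFinset] at *; exact h2 hx)
    _ ≤ l'.length := l'.toFinset_card_le

-- A's redundant 'len(set_) > 2' test never fires when the subset test would pass
theorem len_ofList_le_two (cs : List Char) (h : ∀ c ∈ cs, c = '0' ∨ c = '1') :
    ¬ PySem.Set.len (PySem.Set.ofList cs) > 2 := by
  have hsub : PySem.Set.ofList cs ⊆ (['0', '1'] : List Char) := by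
    intro c hc
    rcases h c ((PySem.Set.mem_ofList cs c).mp hc) with rfl | rfl <;> simp
  have hle := nodup_subset_length_le _ _ (PySem.Set.nodup_ofList cs) hsub
  simp only [List.length_cons, List.length_nil] at hle
  simp only [PySem.Set.len]
  omega

-- the subset test of A is exactly "every character is '0' or '1'"
theorem issubset_ofList_01 (cs : List Char) :
    PySem.Set.issubset (PySem.Set.ofList cs) (['0', '1'] : PySem.Set Char) = true
      ↔ ∀ c ∈ cs, c = '0' ∨ c = '1' := by
  rw [PySem.Set.issubset_iff]
  constructor
  · intro h c hc
    have := h c ((PySem.Set.mem_ofList _ c).mpr hc)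
    simpa using this
  · intro h c hc
    rcases h c ((PySem.Set.mem_ofList _ c).mp hc) with rfl | rfl <;> simp

-- characterization of A's loop
theorem checkLoopA_iff (ref : Int) (ls : List String) :
    checkLoopA ref ls = true ↔
      ∀ l ∈ ls, PySem.Str.len l = ref ∧ ∀ c ∈ l.toList, c = '0' ∨ c = '1' := by
  induction ls with
  | nil => simp [checkLoopA]
  | cons line rest ih =>
    simp only [checkLoopA]
    split_ifs with h1 h2 h3
    · simp only [false_iff]
      intro h
      exact h1 (h line List.mem_cons_self).1
    · simp only [false_iff]
      intro h
      exact len_ofList_le_two _ (fun c hc => (h line List.mem_cons_self).2 c hc) h2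
    · simp only [false_iff]
      intro h
      have := (issubset_ofList_01 line.toList).mpr
        (fun c hc => (h line List.mem_cons_self).2 c hc)
      simp [this] at h3
    · rw [ih]
      simp only [Bool.not_eq_true'] at h3
      have hch : ∀ c ∈ line.toList, c = '0' ∨ c = '1' :=
        (issubset_ofList_01 line.toList).mp (by
          rw [Bool.not_eq_false] at h3; exact h3)
      simp only [List.forall_mem_cons]
      constructor
      · intro h
        exact ⟨⟨not_not.mp (fun hc => h1 hc), hch⟩, h⟩
      · intro h
        exact h.2

-- characterization of A
theorem check_lines_iff (l0 : String) (rest : List String) :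
    check_lines (l0 :: rest) = true ↔
      PySem.Str.len l0 ≠ 0 ∧
      ∀ l ∈ l0 :: rest, PySem.Str.len l = PySem.Str.len l0 ∧ ∀ c ∈ l.toList, c = '0' ∨ c = '1' := by
  simp only [check_lines]
  split_ifs with h0
  · simp only [false_iff]
    rintro ⟨h, _⟩
    exact h h0
  · rw [checkLoopA_iff]
    exact ⟨fun h => ⟨h0, h⟩, fun h => h.2⟩

-- the transpose is never longer than any row
theorem pyZipStarFuel_length_le (fuel : Nat) (ls : List (List Char)) (l : List Char)
    (hl : l ∈ ls) : (pyZipStarFuel fuel ls).length ≤ l.length := by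
  induction fuel generalizing ls l with
  | zero => simp [pyZipStarFuel]
  | succ fuel ih =>
    rw [pyZipStarFuel]
    split_ifs with h
    · simp
    · push Not at h
      have hlne : l ≠ [] := by
        intro he
        exact (by simpa using h.2 : ([] : List Char) ∉ ls) (he ▸ hl)
      have := ih (ls.map List.tail) l.tail (List.mem_map_of_mem hl)
      cases l with
      | nil => exact absurd rfl hlne
      | cons a as => simpa using Nat.succ_le_succ (by simpa using this)

-- if every row has length k ≤ fuel and there is a row, the transpose has length k
theorem pyZipStarFuel_length_eq (fuel : Nat) (ls : List (List Char)) (k : Nat)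
    (hfuel : k ≤ fuel) (hne : ls ≠ []) (hall : ∀ l ∈ ls, l.length = k) :
    (pyZipStarFuel fuel ls).length = k := by
  induction fuel generalizing ls k with
  | zero => simp [pyZipStarFuel]; omega
  | succ fuel ih =>
    rw [pyZipStarFuel]
    split_ifs with h
    · rcases h with h | h
      · exact absurd h hne
      · rcases List.any_eq_true.mp h with ⟨l, hl, hl2⟩
        have := hall l hl
        simp only [List.isEmpty_iff] at hl2
        subst hl2
        simp only [List.length_nil] at this ⊢
        omega
    · push Not at h
      obtain ⟨l0, hl0⟩ : ∃ l0, l0 ∈ ls := by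
        cases ls with
        | nil => exact absurd rfl h.1
        | cons a as => exact ⟨a, List.mem_cons_self⟩
      have hl0ne : l0 ≠ [] := by
        intro he
        exact (by simpa using h.2 : ([] : List Char) ∉ ls) (he ▸ hl0)
      have hk : 1 ≤ k := by
        have := hall l0 hl0
        cases l0 with
        | nil => exact absurd rfl hl0ne
        | cons _ _ => simp at this; omega
      have ihk : (pyZipStarFuel fuel (ls.map List.tail)).length = k - 1 := by
        apply ih _ _ (by omega) (by simpa using h.1)
        intro t ht
        rcases List.mem_map.mp ht with ⟨l, hl, rfl⟩
        have := hall l hl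
        simp [List.length_tail, this]
      simp only [List.length_cons, ihk]
      omega

-- membership of a character in some column of the transpose
theorem pyZipStarFuel_mem_iff (fuel : Nat) (ls : List (List Char)) (c : Char) :
    (∃ col ∈ pyZipStarFuel fuel ls, c ∈ col) ↔
      ∃ l ∈ ls, c ∈ l.take (pyZipStarFuel fuel ls).length := by
  induction fuel generalizing ls with
  | zero => simp [pyZipStarFuel]
  | succ fuel ih =>
    rw [pyZipStarFuel]
    split_ifs with h
    · simp
    · push Not at h
      have hne : ∀ l ∈ ls, l ≠ [] := by
        intro l hl he
        exact (by simpa using h.2 : ([] : List Char) ∉ ls) (he ▸ hl)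
      simp only [List.mem_cons, List.length_cons]
      constructor
      · rintro ⟨col, hcol | hcol, hc⟩
        · subst hcol
          rcases List.mem_map.mp hc with ⟨l, hl, rfl⟩
          refine ⟨l, hl, ?_⟩
          cases hll : l with
          | nil => exact absurd hll (hne l hl)
          | cons a as => simp
        · rcases (ih (ls.map List.tail)).mp ⟨col, hcol, hc⟩ with ⟨t, ht, hct⟩
          rcases List.mem_map.mp ht with ⟨l, hl, rfl⟩
          refine ⟨l, hl, ?_⟩
          cases hll : l with
          | nil => exact absurd hll (hne l hl)
          | cons a as =>
            subst hll
            simp only [List.tail_cons] at hct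
            rw [List.take_succ_cons, List.mem_cons]
            right
            exact hct
      · rintro ⟨l, hl, hc⟩
        cases hll : l with
        | nil => exact absurd hll (hne l hl)
        | cons a as =>
          subst hll
          rw [List.take_succ_cons, List.mem_cons] at hc
          rcases hc with rfl | hc
          · exact ⟨ls.map (fun l => l.headD ' '), Or.inl rfl, by
              simpa using List.mem_map_of_mem (f := fun l => l.headD ' ') hl⟩
          · rcases (ih (ls.map List.tail)).mpr
                ⟨as, by simpa using List.mem_map_of_mem (f := List.tail) hl, hc⟩
              with ⟨col, hcol, hccol⟩
            exact ⟨col, Or.inr hcol, hccol⟩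

-- the transpose is nonempty when there is fuel and a row and no empty row
theorem pyZipStarFuel_ne_nil (fuel : Nat) (ls : List (List Char)) (hfuel : 1 ≤ fuel)
    (hne : ls ≠ []) (hall : ∀ l ∈ ls, l ≠ []) : pyZipStarFuel fuel ls ≠ [] := by
  cases fuel with
  | zero => omega
  | succ fuel =>
    have hguard : ¬(ls = [] ∨ ls.any List.isEmpty = true) := by
      rintro (h | h)
      · exact hne h
      · rcases List.any_eq_true.mp h with ⟨l, hl, hl2⟩
        exact hall l hl (List.isEmpty_iff.mp hl2)
    rw [pyZipStarFuel, if_neg hguard]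
    simp

-- ints each at least m summing to count·m are all m
theorem sum_eq_all_eq (xs : List Int) (m : Int) (hge : ∀ x ∈ xs, m ≤ x)
    (hsum : xs.sum = xs.length * m) : ∀ x ∈ xs, x = m := by
  induction xs with
  | nil => simp
  | cons a as ih =>
    have hge' : ∀ x ∈ as, m ≤ x := fun x hx => hge x (List.mem_cons_of_mem _ hx)
    have hle : (as.length : Int) * m ≤ as.sum := by
      clear hsum ih hge
      induction as with
      | nil => simp
      | cons b bs ih2 =>
        have hb := hge' b List.mem_cons_self
        have := ih2 (fun x hx => hge' x (List.mem_cons_of_mem _ hx))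
        simp only [List.sum_cons, List.length_cons]
        push_cast
        nlinarith
    have ha := hge a List.mem_cons_self
    simp only [List.sum_cons, List.length_cons] at hsum
    push_cast at hsum
    have ha' : a = m := by nlinarith
    intro x hx
    rcases List.mem_cons.mp hx with rfl | hx
    · exact ha'
    · exact ih hge' (by rw [ha'] at hsum; linarith) x hx

-- characterization of B
theorem check_lines_alt_iff (l0 : String) (rest : List String) :
    check_lines_alt (l0 :: rest) = true ↔
      PySem.Str.len l0 ≠ 0 ∧
      ∀ l ∈ l0 :: rest, PySem.Str.len l = PySem.Str.len l0 ∧ ∀ c ∈ l.toList, c = '0' ∨ c = '1' := by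
  simp only [check_lines_alt]
  set ls := (l0 :: rest).map String.toList with hls
  have hfuel : (ls.headD []).length = l0.toList.length := by simp [hls]
  set cols := pyZipStar ls with hcols
  have hcols' : cols = pyZipStarFuel l0.toList.length ls := by
    rw [hcols, pyZipStar, hfuel]
  have hlen_le : ∀ s ∈ l0 :: rest, (cols.length : Int) ≤ PySem.Str.len s := by
    intro s hs
    rw [PySem.Str.len_eq, hcols']
    exact_mod_cast pyZipStarFuel_length_le _ ls s.toList (List.mem_map_of_mem hs)
  split_ifs with hempty hsum
  · -- cols empty: some row is empty, so the right side cannot hold either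
    simp only [false_iff]
    rintro ⟨hne, hall⟩
    rw [List.isEmpty_iff, hcols'] at hempty
    rw [PySem.Str.len_eq] at hne
    have h0 : l0.toList.length ≠ 0 := by exact_mod_cast hne
    apply pyZipStarFuel_ne_nil _ ls (by omega) (by simp [hls]) ?_ hempty
    intro l hl he
    rcases List.mem_map.mp hl with ⟨s, hs, rfl⟩
    have hlen := (hall s hs).1
    rw [PySem.Str.len_eq, PySem.Str.len_eq] at hlen
    have : s.toList.length = 0 := by simp [he]
    omega
  · -- total length ≠ n·len(cols): the lengths cannot all be equal and nonzero
    simp only [false_iff]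
    rintro ⟨hne, hall⟩
    apply hsum
    have hlscols : cols.length = l0.toList.length := by
      rw [hcols']
      apply pyZipStarFuel_length_eq _ ls _ le_rfl (by simp [hls])
      intro l hl
      rcases List.mem_map.mp hl with ⟨s, hs, rfl⟩
      have hlen := (hall s hs).1
      rw [PySem.Str.len_eq, PySem.Str.len_eq] at hlen
      exact_mod_cast hlen
    have hconst : ∀ x ∈ (l0 :: rest).map PySem.Str.len, x = (cols.length : Int) := by
      intro x hx
      rcases List.mem_map.mp hx with ⟨s, hs, rfl⟩
      rw [(hall s hs).1, PySem.Str.len_eq, hlscols]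
    rw [List.sum_eq_card_nsmul _ _ hconst]
    simp [mul_comm]
  · -- both hurdles passed: the column scan equals the row property
    have hne : cols ≠ [] := by simpa [List.isEmpty_iff] using hempty
    have hm1 : 1 ≤ cols.length := by
      cases hc : cols with
      | nil => exact absurd hc hne
      | cons _ _ => simp
    have hsum' : ((l0 :: rest).map PySem.Str.len).sum
        = (((l0 :: rest).map PySem.Str.len).length : Int) * (cols.length : Int) := by
      have := not_not.mp hsum
      simpa using this
    have hall_eq : ∀ s ∈ l0 :: rest, PySem.Str.len s = (cols.length : Int) := by
      intro s hs
      refine sum_eq_all_eq ((l0 :: rest).map PySem.Str.len) (cols.length : Int) ?_ hsum'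
        _ (List.mem_map_of_mem hs)
      rintro x hx
      rcases List.mem_map.mp hx with ⟨t, ht, rfl⟩
      exact hlen_le t ht
    have htake : ∀ s ∈ l0 :: rest, s.toList.take cols.length = s.toList := by
      intro s hs
      apply List.take_of_length_le
      have := hall_eq s hs
      rw [PySem.Str.len_eq] at this
      have : s.toList.length = cols.length := by exact_mod_cast this
      omega
    simp only [List.all_eq_true]
    constructor
    · intro h
      have hchars : ∀ s ∈ l0 :: rest, ∀ c ∈ s.toList, c = '0' ∨ c = '1' := by
        intro s hs c hc
        have hmem : ∃ col ∈ cols, c ∈ col := by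
          rw [hcols']
          apply (pyZipStarFuel_mem_iff _ ls c).mpr
          exact ⟨s.toList, List.mem_map_of_mem hs, by rw [← hcols', htake s hs]; exact hc⟩
        rcases hmem with ⟨col, hcol, hccol⟩
        have := h col hcol c hccol
        simpa using this
      refine ⟨?_, fun l hl => ⟨(hall_eq l hl).trans (hall_eq l0 List.mem_cons_self).symm,
        hchars l hl⟩⟩
      rw [hall_eq l0 List.mem_cons_self]
      exact_mod_cast Nat.one_le_iff_ne_zero.mp hm1
    · rintro ⟨_, hall⟩ col hcol c hc
      have : ∃ l ∈ ls, c ∈ l.take (pyZipStarFuel l0.toList.length ls).length :=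
        (pyZipStarFuel_mem_iff _ ls c).mp ⟨col, by rw [← hcols']; exact hcol, hc⟩
      rcases this with ⟨l, hl, hcl⟩
      rcases List.mem_map.mp hl with ⟨s, hs, rfl⟩
      have := (hall s hs).2 c (List.take_subset _ _ hcl)
      rcases this with rfl | rfl <;> simp

-- ===== VERDICT (by name: the statement is the Claim_ definition above) =====
theorem check_lines_spec : Claim_equal_check_lines := by
  intro lines _
  unfold Spec_check_lines
  cases lines with
  | nil => simp [check_lines, check_lines_alt, pyZipStar, pyZipStarFuel]
  | cons l0 rest =>
    rw [Bool.eq_iff_iff, check_lines_iff, check_lines_alt_iff]
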